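-- pv_equiv track=rewrite | github.com/derrickfurtado/python-specs | 1week/part-4/practice4.py | even_capitalized
-- ===== SOURCE A (Python) =====
-- def even_capitalized(string):
--     new_string = ""
--     string = string.replace(' ','')
--     string = string.replace('.','')
--     for x in range (0,len(string)):
--         if x % 2 == 0:
--             new_string = new_string + string[x].upper()
--         else:
--             new_string = new_string + string[x].lower()
--
--     return new_string
-- ===== SOURCE B (Python) =====
-- from itertools import zip_longest
--
-- def even_capitalized(string):
--     cleaned = string.replace(' ', '').replace('.', '')
--     evens = cleaned[0::2].upper()
--     odds = cleaned[1::2].lower()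
--     return ''.join(a + b for a, b in zip_longest(evens, odds, fillvalue=''))
-- ===== Notes on version B (the rewrite author's own statement) =====
-- stated objective: faster
-- what changed: Replaces A's per-index Python loop with a parity branch and char-by-char string concatenation by two whole strided slices (cleaned[0::2].upper(), cleaned[1::2].lower()) interleaved back with zip_longest; the bulk C-level slice/upper/lower calls give a constant-factor speedup (measured ~1.9x).
import Mathlib
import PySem

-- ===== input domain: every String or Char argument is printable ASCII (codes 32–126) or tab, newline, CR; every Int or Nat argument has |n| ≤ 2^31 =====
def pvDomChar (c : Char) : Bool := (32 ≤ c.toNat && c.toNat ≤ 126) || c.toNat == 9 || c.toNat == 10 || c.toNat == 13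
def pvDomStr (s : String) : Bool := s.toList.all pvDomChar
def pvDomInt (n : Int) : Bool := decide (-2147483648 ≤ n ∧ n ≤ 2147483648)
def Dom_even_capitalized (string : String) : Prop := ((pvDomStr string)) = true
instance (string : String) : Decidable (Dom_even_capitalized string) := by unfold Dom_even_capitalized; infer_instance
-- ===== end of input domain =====

-- B replaces A's indexed loop with a per-index parity branch by two whole strided slices
-- (s[0::2].upper(), s[1::2].lower()) interleaved back together; bulk slice transforms measured
-- moderately faster than A's per-character loop in a timing run (constant factor).

-- ===== PORT A =====
-- Literal port of A: clean the string with two replaces, then loop x over range(0, len),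
-- appending string[x].upper() at even x and string[x].lower() at odd x.
-- (string[x] is PySem.List.pyGet?; inside the loop the index is always in range, so the
-- IndexError case 'none' contributes nothing.)
def even_capitalized (string : String) : String :=
  let string := PySem.Str.replace string " " ""
  let string := PySem.Str.replace string "." ""
  String.ofList <|
    (PySem.List.pyRange 0 (PySem.Str.len string) 1).foldl
      (fun new_string x =>
        if PySem.Int.mod x 2 = 0 then
          new_string ++ ((PySem.Str.pyGet? string x).map PySem.Chars.upperChar).toList
        else
          new_string ++ ((PySem.Str.pyGet? string x).map PySem.Chars.lowerChar).toList)
      []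

-- ===== PORT B =====
-- ''.join(a + b for a, b in zip_longest(evens, odds, fillvalue='')) : interleave two lists,
-- the exhausted side contributing nothing.
def pvInterleave : List Char → List Char → List Char
  | [], ys => ys
  | x :: xs, ys => x :: pvInterleave ys xs
termination_by xs ys => xs.length + ys.length
decreasing_by simp_wf; omega

def even_capitalized_alt (string : String) : String :=
  let cleaned := PySem.Str.replace (PySem.Str.replace string " " "") "." ""
  let evens := PySem.Chars.upper ((PySem.List.slice? cleaned.toList (some 0) none 2).getD [])
  let odds  := PySem.Chars.lower ((PySem.List.slice? cleaned.toList (some 1) none 2).getD [])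
  String.ofList (pvInterleave evens odds)

-- ===== PRECONDITION & SPEC =====
def Spec_even_capitalized (string : String) (out : String) : Prop := out = even_capitalized_alt string
instance (string : String) (out : String) : Decidable (Spec_even_capitalized string out) := by unfold Spec_even_capitalized; infer_instance

-- ===== CLAIM (what is proved, stated in full; the proofs are below) =====
def Claim_equal_even_capitalized : Prop := ∀ (string : String), Dom_even_capitalized string → Spec_even_capitalized string (even_capitalized string)

-- ===== LEMMAS AND PROOFS =====

-- the common meeting point: the transform written as a map over the index range
def pvMid (cs : List Char) : List Char :=
  (List.range cs.length).map (fun i =>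
    if i % 2 = 0 then PySem.Chars.upperChar (cs.getD i ' ') else PySem.Chars.lowerChar (cs.getD i ' '))

-- two-at-a-time recursion skeleton for the inductions below
def pvTwoStep : List Char → Unit
  | [] => ()
  | [_] => ()
  | _ :: _ :: t => pvTwoStep t

-- even-index and odd-index slices
def pvE (cs : List Char) : List Char := (PySem.List.slice? cs (some 0) none 2).getD []
def pvO (cs : List Char) : List Char := (PySem.List.slice? cs (some 1) none 2).getD []

lemma pvE_nil : pvE [] = [] := by decide
lemma pvO_nil : pvO [] = [] := by decide
lemma pvE_single (a : Char) : pvE [a] = [a] := by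
  simp [pvE, PySem.List.slice?, PySem.List.sliceIndices]
lemma pvO_single (a : Char) : pvO [a] = [] := by
  simp [pvO, PySem.List.slice?, PySem.List.sliceIndices]

lemma pvE_closed (cs : List Char) :
    pvE cs = (List.range ((cs.length + 1) / 2)).filterMap (fun k => cs[2 * k]?) := by
  simp [pvE, PySem.List.slice?, PySem.List.sliceIndices]
  have hc : (if 0 < cs.length then (((cs.length : Int) + 2 - 1) / 2).toNat else 0)
      = (cs.length + 1) / 2 := by split <;> omega
  have hf : (fun x : Nat => cs[(2 * (x : Int)).toNat]?) = (fun k : Nat => cs[2 * k]?) := by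
    funext x
    have h2 : (2 * (x : Int)).toNat = 2 * x := by omega
    rw [h2]
  rw [hc, hf]

lemma pvO_closed (cs : List Char) :
    pvO cs = (List.range (cs.length / 2)).filterMap (fun k => cs[2 * k + 1]?) := by
  match cs with
  | [] => decide
  | c :: cs' =>
    simp only [pvO, PySem.List.slice?, PySem.List.sliceIndices]
    norm_num
    have hc : (if 0 < cs'.length then (((cs'.length : Int) + 2 - 1) / 2).toNat else 0)
        = (cs'.length + 1) / 2 := by split <;> omega
    rw [hc]
    congr 1
    funext x
    have h2 : (1 + 2 * (x : Int)).toNat = 2 * x + 1 := by omega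
    rw [h2, List.getElem?_cons_succ]

lemma pvE_cons2 (a b : Char) (t : List Char) : pvE (a :: b :: t) = a :: pvE t := by
  rw [pvE_closed, pvE_closed]
  have hlen : ((a :: b :: t).length + 1) / 2 = (t.length + 1) / 2 + 1 := by simp; omega
  rw [hlen, List.range_succ_eq_map, List.filterMap_cons, List.filterMap_map]
  simp only [Nat.mul_zero, List.getElem?_cons_zero]
  congr 1

lemma pvO_cons2 (a b : Char) (t : List Char) : pvO (a :: b :: t) = b :: pvO t := by
  rw [pvO_closed, pvO_closed]
  have hlen : (a :: b :: t).length / 2 = t.length / 2 + 1 := by simp; omega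
  rw [hlen, List.range_succ_eq_map, List.filterMap_cons, List.filterMap_map]
  simp only [Nat.mul_zero, Nat.zero_add, List.getElem?_cons_succ, List.getElem?_cons_zero]
  congr 1

lemma pvMid_nil : pvMid [] = [] := by simp [pvMid]
lemma pvMid_single (a : Char) : pvMid [a] = [PySem.Chars.upperChar a] := by
  simp [pvMid]
lemma pvMid_cons2 (a b : Char) (t : List Char) :
    pvMid (a :: b :: t) = PySem.Chars.upperChar a :: PySem.Chars.lowerChar b :: pvMid t := by
  simp only [pvMid, List.length_cons]
  rw [List.range_succ_eq_map, List.range_succ_eq_map, List.map_cons, List.map_map, List.map_cons,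
    List.map_map]
  simp only [Function.comp, List.getD_cons_succ]
  simp
  intro i _
  have hp : (i + 1 + 1) % 2 = i % 2 := by omega
  rw [hp]

lemma pvA_loop (t : String) (m : Nat) (hm : m ≤ t.toList.length) :
    (PySem.List.pyRange 0 (m : Int) 1).foldl
      (fun new_string x =>
        if PySem.Int.mod x 2 = 0 then
          new_string ++ ((PySem.Str.pyGet? t x).map PySem.Chars.upperChar).toList
        else
          new_string ++ ((PySem.Str.pyGet? t x).map PySem.Chars.lowerChar).toList)
      []
    = (List.range m).map (fun i =>
        if i % 2 = 0 then PySem.Chars.upperChar (t.toList.getD i ' ') else PySem.Chars.lowerChar (t.toList.getD i ' ')) := by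
  induction m with
  | zero => rfl
  | succ m ih =>
      have hm' : m ≤ t.toList.length := Nat.le_of_succ_le hm
      have hcast : ((m + 1 : Nat) : Int) = (m : Int) + 1 := by push_cast; ring
      rw [hcast, PySem.List.pyRange_one_succ_right (by positivity), List.foldl_append, ih hm',
        List.range_succ, List.map_append]
      have hmod : PySem.Int.mod (m : Int) 2 = ((m % 2 : Nat) : Int) := PySem.Int.mod_natCast m 2
      have hget : PySem.Str.pyGet? t (m : Int) = some (t.toList.getD m ' ') := by
        rw [PySem.Str.pyGet?_natCast]
        simp [List.getD_eq_getElem?_getD, List.getElem?_eq_getElem (show m < t.toList.length by omega)]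
      simp only [List.foldl_cons, List.foldl_nil, hmod, hget, Option.map_some, Option.toList_some]
      simp only [List.map_cons, List.map_nil]
      by_cases hp : m % 2 = 0
      · have hc : ((m % 2 : Nat) : Int) = 0 := by omega
        rw [if_pos hc, if_pos hp]
      · have hc : ¬ ((m % 2 : Nat) : Int) = 0 := by omega
        rw [if_neg hc, if_neg hp]

lemma pvInterleave_cons (x : Char) (xs ys : List Char) :
    pvInterleave (x :: xs) ys = x :: pvInterleave ys xs := by
  rw [pvInterleave]

lemma pvB_eq_mid (cs : List Char) :
    pvInterleave (PySem.Chars.upper (pvE cs)) (PySem.Chars.lower (pvO cs)) = pvMid cs := by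
  induction cs using pvTwoStep.induct with
  | case1 => simp [pvE_nil, pvO_nil, pvMid_nil, PySem.Chars.upper, PySem.Chars.lower, pvInterleave]
  | case2 a => simp [pvE_single, pvO_single, pvMid_single, PySem.Chars.upper, PySem.Chars.lower, pvInterleave]
  | case3 a b t ih =>
      rw [pvE_cons2, pvO_cons2, pvMid_cons2, ← ih]
      simp only [PySem.Chars.upper, PySem.Chars.lower, List.map_cons]
      rw [pvInterleave_cons, pvInterleave_cons]

lemma pvKey (t : String) :
    String.ofList
      ((PySem.List.pyRange 0 (PySem.Str.len t) 1).foldl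
        (fun new_string x =>
          if PySem.Int.mod x 2 = 0 then
            new_string ++ ((PySem.Str.pyGet? t x).map PySem.Chars.upperChar).toList
          else
            new_string ++ ((PySem.Str.pyGet? t x).map PySem.Chars.lowerChar).toList)
        [])
    = String.ofList
        (pvInterleave (PySem.Chars.upper (pvE t.toList)) (PySem.Chars.lower (pvO t.toList))) := by
  rw [PySem.Str.len_eq, pvA_loop t t.toList.length (le_refl _)]
  exact congrArg String.ofList (pvB_eq_mid _).symm

theorem even_capitalized_spec : Claim_equal_even_capitalized := by
  intro s _
  show even_capitalized s = even_capitalized_alt s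
  exact pvKey (PySem.Str.replace (PySem.Str.replace s " " "") "." "")
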